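-- pv_equiv track=rewrite | github.com/Dmarv/Resume | homework3.py | create_tile_puzzle
-- ===== SOURCE A (Python) =====
-- def create_tile_puzzle(rows, cols):
--     li = []
--     n = 1
--     for i in range(rows):
--         temp = []
--         for j in range(cols):
--             temp.append(n)
--             n += 1
--         li.append(temp)
--     li[rows - 1][cols - 1] = 0
--     return li
--
--     pass
-- ===== SOURCE B (Python) =====
-- def create_tile_puzzle(rows, cols):
--     nums = list(range(1, rows * cols + 1))
--     nums[-1] = 0
--     return [nums[i * cols:(i + 1) * cols] for i in range(rows)]
-- ===== Notes on version B (the rewrite author's own statement) =====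
-- stated objective: simpler
-- what changed: Replaces the nested cell-by-cell append loop with a running counter by one flat range generation, a single last-element assignment, and a reshape into rows by slicing.
import Mathlib
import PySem

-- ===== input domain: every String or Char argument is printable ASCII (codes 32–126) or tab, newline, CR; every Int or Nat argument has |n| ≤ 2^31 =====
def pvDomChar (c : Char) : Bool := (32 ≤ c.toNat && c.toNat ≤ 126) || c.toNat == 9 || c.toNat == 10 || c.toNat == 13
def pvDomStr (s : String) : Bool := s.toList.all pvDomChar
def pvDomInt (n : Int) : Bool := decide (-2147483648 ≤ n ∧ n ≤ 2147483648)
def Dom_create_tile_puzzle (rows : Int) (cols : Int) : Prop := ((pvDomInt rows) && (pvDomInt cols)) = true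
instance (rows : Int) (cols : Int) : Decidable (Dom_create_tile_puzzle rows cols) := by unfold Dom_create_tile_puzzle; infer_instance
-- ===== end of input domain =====

-- B builds the grid as one flat range reshaped by slicing instead of A's nested append loops (objective: simpler).

-- ===== PORT A =====
def create_tile_puzzle (rows : Int) (cols : Int) : List (List Int) :=
  let st := (PySem.List.pyRange 0 rows 1).foldl
    (fun (st : List (List Int) × Int) _i =>
      let inner := (PySem.List.pyRange 0 cols 1).foldl
        (fun (st2 : List Int × Int) _j => (st2.1 ++ [st2.2], st2.2 + 1)) ([], st.2)
      (st.1 ++ [inner.1], inner.2)) ([], 1)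
  let li := st.1
  -- li[rows - 1][cols - 1] = 0  (indices in range exactly on Pre_)
  PySem.List.pySetD li (rows - 1)
    (PySem.List.pySetD (PySem.List.pyGetD li (rows - 1) []) (cols - 1) 0)

-- ===== PORT B =====
def create_tile_puzzle_alt (rows : Int) (cols : Int) : List (List Int) :=
  let nums := PySem.List.pyRange 1 (rows * cols + 1) 1
  let nums := PySem.List.pySetD nums (-1) 0   -- nums[-1] = 0 (in range exactly on Pre_)
  (PySem.List.pyRange 0 rows 1).map
    (fun i => PySem.List.slice nums (some (i * cols)) (some ((i + 1) * cols)))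

-- ===== PRECONDITION & SPEC =====
-- A raises IndexError unless both dimensions are at least 1.
def Pre_create_tile_puzzle (rows : Int) (cols : Int) : Prop := 1 ≤ rows ∧ 1 ≤ cols
instance (rows : Int) (cols : Int) : Decidable (Pre_create_tile_puzzle rows cols) := by
  unfold Pre_create_tile_puzzle; infer_instance
def pvWitness_create_tile_puzzle : Int × Int := (2, 3)

def Spec_create_tile_puzzle (rows : Int) (cols : Int) (out : List (List Int)) : Prop :=
  out = create_tile_puzzle_alt rows cols
instance (rows : Int) (cols : Int) (out : List (List Int)) : Decidable (Spec_create_tile_puzzle rows cols out) := by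
  unfold Spec_create_tile_puzzle; infer_instance

-- ===== CLAIM (what is proved, stated in full; the proofs are below) =====
def Claim_equal_create_tile_puzzle : Prop := ∀ (rows : Int) (cols : Int),
  Dom_create_tile_puzzle rows cols → Pre_create_tile_puzzle rows cols →
  Spec_create_tile_puzzle rows cols (create_tile_puzzle rows cols)

-- ===== LEMMAS AND PROOFS =====

-- closed form both ports are reduced to: the numbered grid with the last cell of the last row zeroed
def pvRow (C : Nat) (i : Nat) : List Int := (List.range C).map (fun j => (1 : Int) + (i * C + j : Nat))
def pvGrid (R C : Nat) : List (List Int) := (List.range R).map (pvRow C)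
def pvTarget (R C : Nat) : List (List Int) :=
  (pvGrid R C).set (R - 1) ((pvRow C (R - 1)).set (C - 1) 0)

-- A's outer-loop body, named so the fold lemma can be stated about it
def pvStepO (cols : Int) : (List (List Int) × Int) → Int → (List (List Int) × Int) :=
  fun st _i =>
    let inner := (PySem.List.pyRange 0 cols 1).foldl
      (fun (st2 : List Int × Int) _j => (st2.1 ++ [st2.2], st2.2 + 1)) ([], st.2)
    (st.1 ++ [inner.1], inner.2)

theorem pv_inner (l : List Int) (acc : List Int) (n : Int) :
    l.foldl (fun (st2 : List Int × Int) _j => (st2.1 ++ [st2.2], st2.2 + 1)) (acc, n)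
      = (acc ++ (List.range l.length).map (fun j => n + (j : Nat)), n + l.length) := by
  induction l generalizing acc n with
  | nil => simp
  | cons x xs ih =>
      rw [List.foldl_cons, ih]
      simp only [List.length_cons, Prod.mk.injEq]
      refine ⟨?_, by push_cast; ring⟩
      rw [List.range_succ_eq_map, List.map_cons, List.map_map, List.append_assoc]
      simp only [Nat.cast_zero, add_zero, List.cons_append, List.nil_append]
      congr 1
      congr 1
      apply List.map_congr_left; intro j _
      simp only [Function.comp_apply]
      push_cast; ring

theorem pv_outer (cols : Int) (l : List Int) (acc : List (List Int)) (n : Int) :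
    l.foldl (pvStepO cols) (acc, n)
      = (acc ++ (List.range l.length).map
            (fun i => (List.range cols.toNat).map (fun j => n + ((i * cols.toNat + j : Nat) : Int))),
         n + l.length * cols.toNat) := by
  have hc : (cols - 0).toNat = cols.toNat := by omega
  induction l generalizing acc n with
  | nil => simp
  | cons x xs ih =>
      rw [List.foldl_cons]
      have hstep : pvStepO cols (acc, n) x
          = (acc ++ [(List.range cols.toNat).map (fun j => n + ((j : Nat) : Int))],
             n + cols.toNat) := by
        simp only [pvStepO, pv_inner, PySem.List.length_pyRange_one, hc, List.nil_append]
      rw [hstep, ih]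
      simp only [Prod.mk.injEq, List.length_cons]
      refine ⟨?_, by push_cast; ring⟩
      rw [List.range_succ_eq_map, List.map_cons, List.map_map, List.append_assoc]
      simp only [List.cons_append, List.nil_append]
      congr 1
      congr 1
      · apply List.map_congr_left; intro j hj
        norm_num
      · apply List.map_congr_left; intro i _
        show _ = (List.range cols.toNat).map (fun j => n + (((i + 1) * cols.toNat + j : Nat) : Int))
        apply List.map_congr_left; intro j _
        push_cast; ring

theorem pv_setD_neg_one (xs : List Int) (v : Int) (h : xs ≠ []) :
    PySem.List.pySetD xs (-1) v = xs.set (xs.length - 1) v := by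
  unfold PySem.List.pySetD PySem.List.pySet? PySem.List.pyIdx?
  have hl : 1 ≤ xs.length := List.length_pos_iff.mpr h
  split_ifs <;> simp_all

theorem pv_grid_getD (R C : Nat) (k : Nat) (hk : k < R) :
    (pvGrid R C).getD k [] = pvRow C k := by
  rw [List.getD_eq_getElem _ _ (by simpa [pvGrid] using hk)]
  simp [pvGrid]

theorem pv_A_eq (rows cols : Int) (hr : 1 ≤ rows) (hc : 1 ≤ cols) :
    create_tile_puzzle rows cols = pvTarget rows.toNat cols.toNat := by
  have h0 : create_tile_puzzle rows cols =
      (let st := (PySem.List.pyRange 0 rows 1).foldl (pvStepO cols) (([] : List (List Int)), (1 : Int))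
       PySem.List.pySetD st.1 (rows - 1)
         (PySem.List.pySetD (PySem.List.pyGetD st.1 (rows - 1) []) (cols - 1) 0)) := rfl
  rw [h0, pv_outer]
  have hr1 : rows - 1 = ((rows.toNat - 1 : Nat) : Int) := by omega
  have hc1 : cols - 1 = ((cols.toNat - 1 : Nat) : Int) := by omega
  have hlen : (PySem.List.pyRange 0 rows 1).length = rows.toNat := by
    rw [PySem.List.length_pyRange_one]; omega
  simp only [hlen, List.nil_append, hr1, hc1, PySem.List.pySetD_natCast, PySem.List.pyGetD_natCast]
  have hgrid : (List.range rows.toNat).map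
      (fun i => (List.range cols.toNat).map (fun j => (1 : Int) + ((i * cols.toNat + j : Nat) : Int)))
      = pvGrid rows.toNat cols.toNat := by
    simp [pvGrid, pvRow]
  rw [hgrid, pv_grid_getD _ _ _ (by omega)]
  rfl

theorem pv_B_eq (rows cols : Int) (hr : 1 ≤ rows) (hc : 1 ≤ cols) :
    create_tile_puzzle_alt rows cols = pvTarget rows.toNat cols.toNat := by
  have hr' : ((rows.toNat : Nat) : Int) = rows := Int.toNat_of_nonneg (by omega)
  have hc' : ((cols.toNat : Nat) : Int) = cols := Int.toNat_of_nonneg (by omega)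
  set R := rows.toNat with hRdef
  set C := cols.toNat with hCdef
  have hR1 : 1 ≤ R := by omega
  have hC1 : 1 ≤ C := by omega
  have hRC : rows * cols = ((R * C : Nat) : Int) := by rw [← hr', ← hc']; push_cast; ring
  have h0 : create_tile_puzzle_alt rows cols
      = (PySem.List.pyRange 0 rows 1).map
          (fun i => PySem.List.slice
            (PySem.List.pySetD (PySem.List.pyRange 1 (rows * cols + 1) 1) (-1) 0)
            (some (i * cols)) (some ((i + 1) * cols))) := rfl
  have hnums : PySem.List.pyRange 1 (rows * cols + 1) 1
      = (List.range (R * C)).map (fun k => (1 : Int) + (k : Nat)) := by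
    rw [PySem.List.pyRange_one, hRC]
    congr 1
    rw [show ((R * C : Nat) : Int) + 1 - 1 = ((R * C : Nat) : Int) by ring, Int.toNat_natCast]
  have hne : (List.range (R * C)).map (fun k => (1 : Int) + (k : Nat)) ≠ [] := by
    apply List.ne_nil_of_length_pos
    simp only [List.length_map, List.length_range]
    exact Nat.mul_pos hR1 hC1
  rw [h0, hnums, pv_setD_neg_one _ _ hne]
  simp only [List.length_map, List.length_range]
  set nums' := ((List.range (R * C)).map (fun k => (1 : Int) + (k : Nat))).set (R * C - 1) 0
    with hnums'
  have houter : PySem.List.pyRange 0 rows 1 = (List.range R).map (fun k => ((k : Nat) : Int)) := by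
    rw [PySem.List.pyRange_one]
    have h5 : (rows - 0).toNat = R := by omega
    rw [h5]
    simp
  rw [houter, List.map_map]
  have hlen' : nums'.length = R * C := by simp [hnums']
  have hmulk : ∀ k : Nat, k < R → k * C + C ≤ R * C := by
    intro k hk
    have h6 := Nat.mul_le_mul_right C (show k + 1 ≤ R by omega)
    calc k * C + C = (k + 1) * C := by ring
      _ ≤ R * C := h6
  apply List.ext_getElem
  · simp [pvTarget, pvGrid]
  · intro k hk hk2
    have hkR : k < R := by simpa using hk
    have hrow : (Function.comp (fun i => PySem.List.slice nums' (some (i * cols)) (some ((i + 1) * cols)))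
          (fun k => ((k : Nat) : Int))) k
        = (nums'.drop (k * C)).take C := by
      simp only [Function.comp_apply]
      have e1 : ((k : Nat) : Int) * cols = ((k * C : Nat) : Int) := by rw [← hc']; push_cast; ring
      have e2 : (((k : Nat) : Int) + 1) * cols = ((k * C + C : Nat) : Int) := by
        rw [← hc']; push_cast; ring
      rw [e1, e2, PySem.List.slice_natCast]
      congr 1
      omega
    rw [List.getElem_map, List.getElem_range, hrow]
    have hmul : k * C + C ≤ R * C := hmulk k hkR
    apply List.ext_getElem
    · have h10 : k * C + C ≤ R * C := hmul
      simp only [List.length_take, List.length_drop, hlen', pvTarget]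
      rw [List.getElem_set]
      split_ifs
      · simp only [List.length_set, pvRow, List.length_map, List.length_range]
        omega
      · simp only [pvGrid, List.getElem_map, List.getElem_range, pvRow, List.length_map,
          List.length_range]
        omega
    · intro j hj hj2
      have hjC : j < C := by
        simp only [List.length_take, List.length_drop, hlen'] at hj
        omega
      have hidx : k * C + j < R * C := by omega
      have h8 : (R - 1) * C + C = R * C := by
        have h9 : (R - 1 + 1) * C = R * C := by congr 1; omega
        calc (R - 1) * C + C = (R - 1 + 1) * C := by ring
          _ = R * C := h9
      rw [List.getElem_take, List.getElem_drop]
      simp only [hnums', pvTarget, pvGrid, pvRow, List.getElem_set, List.getElem_map,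
        List.getElem_range]
      by_cases hkk : R - 1 = k
      · subst hkk
        simp only [↓reduceIte, List.getElem_set]
        by_cases hjj : C - 1 = j
        · subst hjj
          rw [if_pos (by omega), if_pos rfl]
        · rw [if_neg (by omega), if_neg hjj]
          simp
      · have hk2' : k + 1 ≤ R - 1 := by omega
        have h7 : (k + 1) * C ≤ (R - 1) * C := Nat.mul_le_mul_right C hk2'
        have hx : k * C + C ≤ (R - 1) * C := by
          calc k * C + C = (k + 1) * C := by ring
            _ ≤ (R - 1) * C := h7
        simp only [if_neg hkk, List.getElem_map, List.getElem_range]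
        rw [if_neg (by omega)]

-- ===== VERDICT (by name: the statement is the Claim_ definition above) =====
theorem create_tile_puzzle_spec : Claim_equal_create_tile_puzzle := by
  intro rows cols _ hpre
  unfold Spec_create_tile_puzzle
  rw [pv_A_eq rows cols hpre.1 hpre.2, pv_B_eq rows cols hpre.1 hpre.2]
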